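-- pv_equiv track=rewrite | github.com/SohailNizam/HART | HART.py | sort_hal
-- ===== SOURCE A (Python) =====
-- def update_val_dict(hal_fit, value_dict):
--
--
--     #update value_list by removing all terms that are only in there
--     #because of an interaction that relies on this value
--     #or a value greater than it within the same var
--
--
--     #first copy value_dict so original is unaltered
--     new_value_dict = value_dict.copy()
--     #initialize a list of values to remove
--     vals_to_rmv = []
--
--
--     #iterate over all of the values within the current variable
--     #so if at x2_3, go over all values in x2 (will start at x2_3)
--     for i in range(len(hal_fit[0])):
--
--         #iterate over new_value_dict keys
--         for val in new_value_dict.keys():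
--             #set a boolean = True
--             remove_val = True
--
--             #don't remove the term itself
--             if val == hal_fit[0][i]:
--                 remove_val = False
--
--             #iterate over the list associated with that value
--             for term in new_value_dict[val]:
--
--                 #if any of the terms in the list
--                 #do not contain the current tree value
--                 #change our boolean to false
--                 if hal_fit[0][i] not in term:
--                     remove_val = False
--
--                     #we only need one term to not contain our value
--                     break
--
--             #if remove_val has been changed to false,
--             #it means there's a reason to keep it
--             if remove_val:
--                 vals_to_rmv.append(val)
--
--
--     for val in list(set(vals_to_rmv)):
--         del new_value_dict[val]
--
--     return(new_value_dict)
--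
-- def sort_hal(hal_fit, value_dict):
--
--     #takes hal_fit and orders the variables
--     #by the number of values that would be removed if
--     #the first value of that variable were selected
--
--     num_vals = len(value_dict.keys())
--     num_removed_list = []
--
--
--     for ind, var in enumerate(hal_fit):
--
--         num_removed = 0
--
--         #move that var to first position in hal_fit
--         new_hal_fit = hal_fit.copy()
--         new_hal_fit = [new_hal_fit.pop(ind)] + new_hal_fit
--
--
--         val_dict_left = update_val_dict(new_hal_fit, value_dict)
--         num_vals_left = len(val_dict_left.keys())
--
--         num_removed += num_vals - num_vals_left
--         num_removed += len(var) + 1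
--
--
--         num_removed_list.append(num_removed)
--
--
--     if len(num_removed_list) > 0:
--         best_index = num_removed_list.index(max(num_removed_list))
--         sorted_fit = [hal_fit.pop(best_index)] + hal_fit
--
--     else:
--         sorted_fit = hal_fit
--
--
--
--     return(sorted_fit)
-- ===== SOURCE B (Python) =====
-- def sort_hal(hal_fit, value_dict):
--     # Note: unlike A, B does not mutate hal_fit; return values agree.
--     if not hal_fit:
--         return hal_fit
--
--     # inverted index, built once: for each string s in hal_fit,
--     # the dict keys that s "dominates" (s appears in all of their terms)
--     covers = {}
--     for var in hal_fit:
--         for s in var: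
--             if s not in covers:
--                 covers[s] = [val for val, terms in value_dict.items()
--                              if s != val and all(s in t for t in terms)]
--
--     def score(var):
--         removed = set()
--         for s in var:
--             removed.update(covers[s])
--         return len(removed) + len(var) + 1
--
--     # single right-to-left pass: for the suffix seen so far keep its first
--     # best element, that element's score, the suffix minus it, and the suffix
--     best = hal_fit[-1]
--     bscore = score(best)
--     others = []
--     suffix = [best]
--     for head in reversed(hal_fit[:-1]):
--         s = score(head)
--         if s >= bscore:
--             best, bscore, others = head, s, suffix
--         else:
--             others = [head] + others
--         suffix = [head] + suffix
--     return [best] + others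
-- ===== Notes on version B (the rewrite author's own statement) =====
-- stated objective: alternative
-- what changed: B precomputes an inverted index (each string -> the dict keys it dominates) once, scores a variable as the size of the union of those precomputed key sets, and selects the winner in a single right-to-left fold carrying (best, best score, list-minus-best) - no per-variable dict copy/flag/break/delete, no score list, no max/index/pop; B does not mutate hal_fit (return values agree).
import Mathlib
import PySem

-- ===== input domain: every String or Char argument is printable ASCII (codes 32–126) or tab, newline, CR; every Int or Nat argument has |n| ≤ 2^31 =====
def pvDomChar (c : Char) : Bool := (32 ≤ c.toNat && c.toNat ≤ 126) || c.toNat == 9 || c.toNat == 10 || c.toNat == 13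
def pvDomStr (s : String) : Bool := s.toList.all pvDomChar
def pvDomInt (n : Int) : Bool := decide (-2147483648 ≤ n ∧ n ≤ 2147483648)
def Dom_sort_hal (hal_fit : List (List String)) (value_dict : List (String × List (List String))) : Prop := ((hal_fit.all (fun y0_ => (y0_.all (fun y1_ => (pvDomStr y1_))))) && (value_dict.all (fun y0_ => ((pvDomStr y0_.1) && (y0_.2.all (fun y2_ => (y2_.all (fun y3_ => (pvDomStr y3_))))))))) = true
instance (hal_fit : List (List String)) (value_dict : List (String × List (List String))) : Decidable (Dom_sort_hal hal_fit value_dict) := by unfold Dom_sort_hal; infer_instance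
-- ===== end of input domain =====

-- ===== PORT A =====
-- A pops an element out of hal_fit, so it mutates its argument; the equivalence proved here is about the RETURN value only.
-- helper: literal port of update_val_dict (value_dict arrives as a Python dict; all call sites pass a nonempty hal_fit,
-- so hal_fit[0] is ported as headD)
def update_val_dict (hal_fit : List (List String)) (value_dict : PySem.Dict String (List (List String))) : PySem.Dict String (List (List String)) :=
  let new_value_dict := value_dict
  let var0 := hal_fit.headD []
  let vals_to_rmv : List String :=
    var0.foldl (fun acc s =>
      new_value_dict.keys.foldl (fun acc val =>
        let remove_val := true
        let remove_val := if val == s then false else remove_val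
        -- the term loop with break: remove_val survives iff every term contains s
        let remove_val := remove_val && (new_value_dict.getD val []).all (fun term => term.contains s)
        if remove_val then acc ++ [val] else acc) acc) []
  (PySem.Set.ofList vals_to_rmv).foldl (fun d val => d.erase val) new_value_dict

def sort_hal (hal_fit : List (List String)) (value_dict : List (String × List (List String))) : List (List String) :=
  let vd := PySem.Dict.ofList value_dict
  let num_vals := vd.size
  let num_removed_list : List Int :=
    (PySem.List.enumerate hal_fit).foldl (fun acc p =>
      match PySem.List.pop? hal_fit p.1 with
      | some (x, rest) =>
        let new_hal_fit := [x] ++ rest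
        let val_dict_left := update_val_dict new_hal_fit vd
        let num_vals_left := val_dict_left.size
        let num_removed : Int := ((num_vals : Int) - (num_vals_left : Int)) + ((p.2.length : Int) + 1)
        acc ++ [num_removed]
      | none => acc   -- unreachable: enumerate indices are in range
      ) []
  if num_removed_list.length > 0 then
    match PySem.List.max? num_removed_list (fun x => x) with
    | some m =>
      match PySem.List.index? num_removed_list m with
      | some best_index =>
        match PySem.List.pop? hal_fit (best_index : Int) with
        | some (x, rest) => [x] ++ rest
        | none => hal_fit
      | none => hal_fit
    | none => hal_fit
  else hal_fit

-- ===== PORT B =====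
-- B-side helpers mirroring Source B: the inverted-index entry for one string s
-- (the list comprehension '[val for val, terms in value_dict.items() if s != val and all(s in t for t in terms)]')
def pvCoverList (items : List (String × List (List String))) (s : String) : List String :=
  (items.filter (fun p => (s != p.1) && p.2.all (fun tm => tm.contains s))).map Prod.fst

-- the 'covers' dict built by the two nested for-loops ('if s not in covers: covers[s] = …')
def pvCovers (items : List (String × List (List String))) (hal_fit : List (List String)) : PySem.Dict String (List String) :=
  hal_fit.foldl (fun d var =>
    var.foldl (fun d s => if d.contains s then d else d.insert s (pvCoverList items s)) d)
    PySem.Dict.empty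

-- the 'score' closure: size of the union of the precomputed cover sets, plus len(var) + 1
def pvScoreB (covers : PySem.Dict String (List String)) (var : List String) : Int :=
  (((var.foldl (fun removed s => PySem.Set.update removed (covers.getD s [])) PySem.Set.empty).length : Int))
    + (var.length : Int) + 1

-- one step of the right-to-left loop; state = (best, best score, suffix minus best, suffix)
def pvSelStep (score : List String → Int)
    (st : List String × Int × List (List String) × List (List String)) (head : List String) :
    List String × Int × List (List String) × List (List String) :=
  let s := score head
  if s ≥ st.2.1 then (head, s, st.2.2.2, head :: st.2.2.2)
  else (st.1, st.2.1, head :: st.2.2.1, head :: st.2.2.2)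

def sort_hal_alt (hal_fit : List (List String)) (value_dict : List (String × List (List String))) : List (List String) :=
  match hal_fit with
  | [] => hal_fit
  | a :: t =>
    let items := (PySem.Dict.ofList value_dict).items
    let covers := pvCovers items (a :: t)
    let score := pvScoreB covers
    let last := (a :: t).getLast (by simp)
    let fin := ((a :: t).dropLast.reverse).foldl (pvSelStep score)
      (last, score last, ([] : List (List String)), [last])
    fin.1 :: fin.2.2.1

-- ===== PRECONDITION & SPEC =====
def Spec_sort_hal (hal_fit : List (List String)) (value_dict : List (String × List (List String))) (out : List (List String)) : Prop := out = sort_hal_alt hal_fit value_dict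
instance (hal_fit : List (List String)) (value_dict : List (String × List (List String))) (out : List (List String)) : Decidable (Spec_sort_hal hal_fit value_dict out) := by unfold Spec_sort_hal; infer_instance

-- ===== CLAIM (what is proved, stated in full; the proofs are below) =====
def Claim_equal_sort_hal : Prop := ∀ (hal_fit : List (List String)) (value_dict : List (String × List (List String))), Dom_sort_hal hal_fit value_dict → Spec_sort_hal hal_fit value_dict (sort_hal hal_fit value_dict)

-- ===== LEMMAS AND PROOFS =====

-- the per-pair removal test both programs decide
def pvPred (var : List String) (p : String × List (List String)) : Bool :=
  var.any (fun s => (s != p.1) && p.2.all (fun t => t.contains s))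

-- the common score of a variable
def pvScore (d : PySem.Dict String (List (List String))) (var : List String) : Int :=
  ((d.items.countP (pvPred var) : Int)) + (var.length : Int) + 1

-- ---------- A side: A's score list is the pointwise pvScore of hal_fit ----------

-- erasing a list of keys filters the items
lemma erase_foldl_items (rs : List String) (d : PySem.Dict String (List (List String))) :
    (rs.foldl (fun d val => d.erase val) d).items
      = d.items.filter (fun p => !(rs.contains p.1)) := by
  induction rs generalizing d with
  | nil => simp
  | cons r rs ih =>
    rw [List.foldl_cons, ih]
    have : (PySem.Dict.erase d r).items = d.items.filter (fun p => !(p.1 == r)) := rfl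
    rw [this, List.filter_filter]
    apply List.filter_congr
    intro p _
    by_cases h1 : p.1 = r <;> simp [h1]

-- update_val_dict deletes exactly the pvPred-satisfying keys
lemma update_items (var : List String) (rest : List (List String)) (d : PySem.Dict String (List (List String)))
    (hnd : d.keys.Nodup) :
    (update_val_dict (var :: rest) d).items = d.items.filter (fun p => !(pvPred var p)) := by
  simp only [update_val_dict, List.headD_cons]
  rw [erase_foldl_items]
  apply List.filter_congr
  intro p hp
  have hstep : ∀ (acc : List String) (s : String),
      d.keys.foldl (fun acc val =>
        if ((if val == s then false else true) && (d.getD val []).all (fun term => term.contains s))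
        then acc ++ [val] else acc) acc
        = acc ++ d.keys.filter (fun val =>
            ((if val == s then false else true) && (d.getD val []).all (fun term => term.contains s))) := by
    intro acc s
    simpa using PySem.List.foldl_append_if
      (fun val => ((if val == s then false else true) && (d.getD val []).all (fun term => term.contains s)))
      id d.keys acc
  rw [PySem.List.foldl_congr_mem _ _
      (fun acc s => acc ++ d.keys.filter (fun val =>
        ((if val == s then false else true) && (d.getD val []).all (fun term => term.contains s)))) _
      (fun acc s _ => hstep acc s),
    PySem.List.foldl_append_eq_flatMap]
  congr 1
  have hkey : p.1 ∈ d.keys := PySem.Dict.mem_keys_of_mem_items d hp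
  have hget : d.getD p.1 [] = p.2 := PySem.Dict.getD_of_mem_items d hp hnd []
  rw [Bool.eq_iff_iff]
  simp only [List.contains_iff_mem, PySem.Set.mem_ofList, List.nil_append, List.mem_flatMap,
    List.mem_filter, pvPred, List.any_eq_true, hget]
  constructor
  · rintro ⟨s, hs, -, hc⟩
    refine ⟨s, hs, ?_⟩
    by_cases h1 : p.1 = s
    · simp [h1] at hc
    · simp [h1, bne] at hc ⊢
      exact ⟨fun h => h1 h.symm, hc⟩
  · rintro ⟨s, hs, hc⟩
    refine ⟨s, hs, hkey, ?_⟩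
    by_cases h1 : p.1 = s
    · simp [h1, bne] at hc
    · simp [h1, bne] at hc ⊢
      exact hc.2

-- A's score for a variable equals pvScore
lemma score_eq (var : List String) (rest : List (List String)) (d : PySem.Dict String (List (List String)))
    (hnd : d.keys.Nodup) :
    ((d.size : Int) - ((update_val_dict (var :: rest) d).size : Int)) + ((var.length : Int) + 1)
      = pvScore d var := by
  have h := update_items var rest d hnd
  have hsize : (update_val_dict (var :: rest) d).size = (d.items.filter (fun p => !(pvPred var p))).length := by
    show (update_val_dict (var :: rest) d).items.length = _
    rw [h]
  have hdsize : d.size = d.items.length := rfl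
  have e1 : (List.filter (fun p => !pvPred var p) d.items).length
      = List.countP (fun p => !pvPred var p) d.items := by
    rw [List.countP_eq_length_filter]
  have h2 : d.items.countP (pvPred var) + d.items.countP (fun p => !pvPred var p)
      = d.items.length := by
    have := List.length_eq_countP_add_countP (l := d.items) (p := pvPred var)
    simpa using this.symm
  simp only [pvScore, hsize, hdsize, e1]
  omega

-- A's score list
lemma scores_eq (hal_fit : List (List String)) (value_dict : List (String × List (List String))) :
    (PySem.List.enumerate hal_fit).foldl (fun acc p =>
      match PySem.List.pop? hal_fit p.1 with
      | some (x, rest) =>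
        acc ++ [(((PySem.Dict.ofList value_dict).size : Int)
          - ((update_val_dict ([x] ++ rest) (PySem.Dict.ofList value_dict)).size : Int))
          + ((p.2.length : Int) + 1)]
      | none => acc) []
    = hal_fit.map (pvScore (PySem.Dict.ofList value_dict)) := by
  have hcong : ∀ (acc : List Int), ∀ p ∈ PySem.List.enumerate hal_fit 0,
      (match PySem.List.pop? hal_fit p.1 with
      | some (x, rest) =>
        acc ++ [(((PySem.Dict.ofList value_dict).size : Int)
          - ((update_val_dict ([x] ++ rest) (PySem.Dict.ofList value_dict)).size : Int))
          + ((p.2.length : Int) + 1)]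
      | none => acc)
      = acc ++ [pvScore (PySem.Dict.ofList value_dict) p.2] := by
    intro acc p hp
    obtain ⟨k, hk, rfl⟩ := (PySem.List.mem_enumerate_iff hal_fit 0 p).mp hp
    have hpop := PySem.List.pop?_natCast hal_fit k hk
    simp only [zero_add, hpop, List.singleton_append]
    rw [score_eq hal_fit[k] (hal_fit.eraseIdx k) (PySem.Dict.ofList value_dict)
        (PySem.Dict.nodup_keys_ofList value_dict)]
  rw [PySem.List.foldl_congr_mem _ _
      (fun acc p => acc ++ [pvScore (PySem.Dict.ofList value_dict) p.2]) _ hcong,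
    PySem.List.foldl_append_singleton_eq_map, List.nil_append]
  conv_rhs => rw [← PySem.List.map_snd_enumerate hal_fit 0]
  rw [List.map_map]
  rfl

-- ---------- B side: the covers dict looks up pvCoverList ----------

lemma covers_inner (items : List (String × List (List String))) (ss : List String)
    (d : PySem.Dict String (List String))
    (hInv : ∀ k, d.contains k = true → d.getD k [] = pvCoverList items k) :
    (∀ k, (ss.foldl (fun d s => if d.contains s then d else d.insert s (pvCoverList items s)) d).contains k = true →
      (ss.foldl (fun d s => if d.contains s then d else d.insert s (pvCoverList items s)) d).getD k [] = pvCoverList items k)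
    ∧ (∀ k, d.contains k = true →
      (ss.foldl (fun d s => if d.contains s then d else d.insert s (pvCoverList items s)) d).contains k = true)
    ∧ (∀ s ∈ ss, (ss.foldl (fun d s => if d.contains s then d else d.insert s (pvCoverList items s)) d).contains s = true) := by
  induction ss generalizing d with
  | nil => exact ⟨hInv, fun k h => h, by simp⟩
  | cons s ss ih =>
    simp only [List.foldl_cons]
    by_cases hc : d.contains s = true
    · rw [if_pos hc]
      obtain ⟨h1, h2, h3⟩ := ih d hInv
      refine ⟨h1, h2, fun x hx => ?_⟩
      rcases List.mem_cons.mp hx with rfl | hx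
      · exact h2 x hc
      · exact h3 x hx
    · rw [if_neg hc]
      have hInv' : ∀ k, (d.insert s (pvCoverList items s)).contains k = true →
          (d.insert s (pvCoverList items s)).getD k [] = pvCoverList items k := by
        intro k hk
        rw [PySem.Dict.getD_insert]
        by_cases hks : k = s
        · simp [hks]
        · rw [if_neg hks]
          rw [PySem.Dict.contains_insert] at hk
          simp only [Bool.or_eq_true, beq_iff_eq] at hk
          rcases hk with rfl | hk
          · exact absurd rfl hks
          · exact hInv k hk
      obtain ⟨h1, h2, h3⟩ := ih (d.insert s (pvCoverList items s)) hInv'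
      refine ⟨h1, fun k hk => h2 k ?_, fun x hx => ?_⟩
      · rw [PySem.Dict.contains_insert, hk]; simp
      · rcases List.mem_cons.mp hx with rfl | hx
        · exact h2 x (by rw [PySem.Dict.contains_insert]; simp)
        · exact h3 x hx

-- monotone invariant over the outer fold
lemma covers_outer (items : List (String × List (List String))) (l : List (List String)) :
    ∀ (d : PySem.Dict String (List String)),
    (∀ k, d.contains k = true → d.getD k [] = pvCoverList items k) →
    (∀ k, (l.foldl (fun d var => var.foldl (fun d s => if d.contains s then d else d.insert s (pvCoverList items s)) d) d).contains k = true →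
      (l.foldl (fun d var => var.foldl (fun d s => if d.contains s then d else d.insert s (pvCoverList items s)) d) d).getD k [] = pvCoverList items k)
    ∧ (∀ k, d.contains k = true →
      (l.foldl (fun d var => var.foldl (fun d s => if d.contains s then d else d.insert s (pvCoverList items s)) d) d).contains k = true)
    ∧ (∀ v ∈ l, ∀ x ∈ v, (l.foldl (fun d var => var.foldl (fun d s => if d.contains s then d else d.insert s (pvCoverList items s)) d) d).contains x = true) := by
  induction l with
  | nil => exact fun d hInv => ⟨hInv, fun k h => h, by simp⟩
  | cons v vs ih =>
    intro d hInv
    simp only [List.foldl_cons]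
    obtain ⟨i1, i2, i3⟩ := covers_inner items v d hInv
    obtain ⟨o1, o2, o3⟩ := ih _ i1
    refine ⟨o1, fun k hk => o2 k (i2 k hk), fun w hw x hx => ?_⟩
    rcases List.mem_cons.mp hw with rfl | hw
    · exact o2 x (i3 x hx)
    · exact o3 w hw x hx

lemma covers_getD (items : List (String × List (List String))) (l : List (List String))
    (var : List String) (hvar : var ∈ l) (s : String) (hs : s ∈ var) :
    (pvCovers items l).getD s [] = pvCoverList items s := by
  obtain ⟨h1, -, h3⟩ := covers_outer items l PySem.Dict.empty
    (by intro k hk; simp [PySem.Dict.contains_empty] at hk)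
  exact h1 s (h3 var hvar s hs)

-- membership and nodup of the union fold
lemma foldl_update_nodup (f : String → List String) (var : List String) :
    ∀ (st : List String), st.Nodup →
      (var.foldl (fun st s => PySem.Set.update st (f s)) st).Nodup := by
  induction var with
  | nil => exact fun st h => h
  | cons s ss ih =>
    intro st h
    exact ih _ (PySem.Set.nodup_update st (f s) h)

lemma foldl_update_mem (f : String → List String) (var : List String) :
    ∀ (st : List String) (x : String),
      x ∈ var.foldl (fun st s => PySem.Set.update st (f s)) st ↔ x ∈ st ∨ ∃ s ∈ var, x ∈ f s := by
  induction var with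
  | nil => simp
  | cons s ss ih =>
    intro st x
    simp only [List.foldl_cons, ih, PySem.Set.mem_update, List.mem_cons]
    constructor
    · rintro ((h | h) | ⟨s', hs', h⟩)
      · exact Or.inl h
      · exact Or.inr ⟨s, Or.inl rfl, h⟩
      · exact Or.inr ⟨s', Or.inr hs', h⟩
    · rintro (h | ⟨s', (rfl | hs'), h⟩)
      · exact Or.inl (Or.inl h)
      · exact Or.inl (Or.inr h)
      · exact Or.inr ⟨s', hs', h⟩

-- B's score equals pvScore on members of hal_fit
lemma scoreB_eq (value_dict : List (String × List (List String))) (l : List (List String))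
    (var : List String) (hvar : var ∈ l) :
    pvScoreB (pvCovers (PySem.Dict.ofList value_dict).items l) var
      = pvScore (PySem.Dict.ofList value_dict) var := by
  have hnd := PySem.Dict.nodup_keys_ofList value_dict
  set d := PySem.Dict.ofList value_dict with hd
  unfold pvScoreB pvScore
  have hrw : var.foldl (fun removed s => PySem.Set.update removed ((pvCovers d.items l).getD s [])) PySem.Set.empty
      = var.foldl (fun removed s => PySem.Set.update removed (pvCoverList d.items s)) PySem.Set.empty := by
    apply PySem.List.foldl_congr_mem
    intro acc s hs
    rw [covers_getD d.items l var hvar s hs]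
  rw [hrw]
  have hnodup1 : (var.foldl (fun removed s => PySem.Set.update removed (pvCoverList d.items s)) PySem.Set.empty).Nodup :=
    foldl_update_nodup _ var [] List.nodup_nil
  have hnodup2 : ((d.items.filter (pvPred var)).map Prod.fst).Nodup := by
    have hsub : List.Sublist ((d.items.filter (pvPred var)).map Prod.fst) (d.items.map Prod.fst) :=
      List.Sublist.map Prod.fst List.filter_sublist
    exact List.Nodup.sublist hsub hnd
  have hmem : ∀ x, x ∈ var.foldl (fun removed s => PySem.Set.update removed (pvCoverList d.items s)) PySem.Set.empty
      ↔ x ∈ (d.items.filter (pvPred var)).map Prod.fst := by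
    intro x
    rw [foldl_update_mem]
    simp only [PySem.Set.empty, List.not_mem_nil, false_or, pvCoverList, List.mem_map,
      List.mem_filter, pvPred, List.any_eq_true]
    constructor
    · rintro ⟨s, hs, p, ⟨hp, hpr⟩, rfl⟩
      exact ⟨p, ⟨hp, ⟨s, hs, hpr⟩⟩, rfl⟩
    · rintro ⟨p, ⟨hp, ⟨s, hs, hpr⟩⟩, rfl⟩
      exact ⟨s, hs, p, ⟨hp, hpr⟩, rfl⟩
  have hperm := (List.perm_ext_iff_of_nodup hnodup1 hnodup2).mpr hmem
  have hlen := hperm.length_eq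
  rw [List.length_map] at hlen
  rw [hlen, List.countP_eq_length_filter]

-- ---------- B side: the selection fold ----------

def pvSelB (score : List String → Int) : List (List String) → List String →
    List String × Int × List (List String) × List (List String)
  | [], last => (last, score last, [], [last])
  | x :: xs, last => pvSelStep score (pvSelB score xs last) x

lemma fold_selB (score : List String → Int) (ys : List (List String)) (last : List String) :
    (ys.reverse).foldl (pvSelStep score) (last, score last, ([] : List (List String)), [last])
      = pvSelB score ys last := by
  rw [List.foldl_reverse]
  induction ys with
  | nil => rfl
  | cons x xs ih => rw [List.foldr_cons, ih]; rfl

lemma selB_spec (score : List String → Int) (ys : List (List String)) (last : List String) :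
    ∃ pre suf,
      ys ++ [last] = pre ++ (pvSelB score ys last).1 :: suf ∧
      (pvSelB score ys last).2.1 = score (pvSelB score ys last).1 ∧
      (pvSelB score ys last).2.2.1 = pre ++ suf ∧
      (pvSelB score ys last).2.2.2 = ys ++ [last] ∧
      (∀ y ∈ pre, score y < score (pvSelB score ys last).1) ∧
      (∀ y ∈ suf, score y ≤ score (pvSelB score ys last).1) := by
  induction ys with
  | nil => exact ⟨[], [], rfl, rfl, rfl, rfl, by simp, by simp⟩
  | cons x xs ih =>
    obtain ⟨pre, suf, heq, hsc, ho, hfull, hpre, hsufle⟩ := ih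
    simp only [pvSelB, pvSelStep]
    by_cases hge : score x ≥ (pvSelB score xs last).2.1
    · rw [if_pos hge]
      have hb : score (pvSelB score xs last).1 ≤ score x := by rw [hsc] at hge; exact hge
      refine ⟨[], xs ++ [last], by simp, rfl, by simp [hfull], by simp [hfull], by simp, ?_⟩
      intro y hy
      rw [heq] at hy
      rcases List.mem_append.mp hy with hy | hy
      · exact le_of_lt (lt_of_lt_of_le (hpre y hy) hb)
      · rcases List.mem_cons.mp hy with rfl | hy
        · exact hb
        · exact le_trans (hsufle y hy) hb
    · rw [if_neg hge]
      have hx : score x < score (pvSelB score xs last).1 := by rw [← hsc]; exact lt_of_not_ge hge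
      refine ⟨x :: pre, suf, by simp [heq], hsc, by simp [ho], by simp [hfull], ?_, hsufle⟩
      intro y hy
      rcases List.mem_cons.mp hy with rfl | hy
      · exact hx
      · exact hpre y hy

-- indexing a split list at the split point
lemma getElem_at_split {α : Type} (pre suf : List α) (b : α) :
    (pre ++ b :: suf)[pre.length]'(by simp) = b := by
  induction pre with
  | nil => rfl
  | cons x xs ih =>
    simp only [List.cons_append, List.length_cons, List.getElem_cons_succ]
    exact ih

lemma eraseIdx_at_split {α : Type} (pre suf : List α) (b : α) :
    (pre ++ b :: suf).eraseIdx pre.length = pre ++ suf := by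
  induction pre with
  | nil => rfl
  | cons x xs ih =>
    simp only [List.cons_append, List.length_cons, List.eraseIdx_cons_succ, ih]

-- ===== VERDICT (by name: the statement is the Claim_ definition above) =====
theorem sort_hal_spec : Claim_equal_sort_hal := by
  intro hal_fit value_dict _
  show sort_hal hal_fit value_dict = sort_hal_alt hal_fit value_dict
  cases hal_fit with
  | nil => simp [sort_hal, sort_hal_alt, PySem.List.enumerate]
  | cons a t =>
    have hnd := PySem.Dict.nodup_keys_ofList value_dict
    have hne : (a :: t) ≠ [] := by simp
    obtain ⟨pre, suf, heq, hsc1, ho, hfull, hpre, hsufle⟩ :=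
      selB_spec (pvScoreB (pvCovers (PySem.Dict.ofList value_dict).items (a :: t)))
        (a :: t).dropLast ((a :: t).getLast hne)
    have hl : (a :: t) = pre ++ (pvSelB (pvScoreB (pvCovers (PySem.Dict.ofList value_dict).items (a :: t))) (a :: t).dropLast ((a :: t).getLast hne)).1 :: suf := by
      exact (List.dropLast_append_getLast hne).symm.trans heq
    -- abbreviate the selected element
    generalize hbdef : (pvSelB (pvScoreB (pvCovers (PySem.Dict.ofList value_dict).items (a :: t))) (a :: t).dropLast ((a :: t).getLast hne)) = stt at *
    obtain ⟨b, bs, others, full⟩ := stt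
    simp only at hl ho hpre hsufle hsc1
    have hscmem : ∀ y ∈ (a :: t),
        pvScoreB (pvCovers (PySem.Dict.ofList value_dict).items (a :: t)) y
          = pvScore (PySem.Dict.ofList value_dict) y :=
      fun y hy => scoreB_eq value_dict (a :: t) y hy
    have hbl : b ∈ (a :: t) := by
      rw [hl]; exact List.mem_append_right _ (List.mem_cons_self ..)
    have hprelt : ∀ y ∈ pre, pvScore (PySem.Dict.ofList value_dict) y < pvScore (PySem.Dict.ofList value_dict) b := by
      intro y hy
      have hyl : y ∈ (a :: t) := by rw [hl]; exact List.mem_append_left _ hy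
      rw [← hscmem y hyl, ← hscmem b hbl]; exact hpre y hy
    have hsufle' : ∀ y ∈ suf, pvScore (PySem.Dict.ofList value_dict) y ≤ pvScore (PySem.Dict.ofList value_dict) b := by
      intro y hy
      have hyl : y ∈ (a :: t) := by
        rw [hl]; exact List.mem_append_right _ (List.mem_cons_of_mem _ hy)
      rw [← hscmem y hyl, ← hscmem b hbl]; exact hsufle y hy
    have hmaxle : ∀ y ∈ (a :: t), pvScore (PySem.Dict.ofList value_dict) y ≤ pvScore (PySem.Dict.ofList value_dict) b := by
      intro y hy
      rw [hl] at hy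
      rcases List.mem_append.mp hy with h | h
      · exact le_of_lt (hprelt y h)
      · rcases List.mem_cons.mp h with rfl | h
        · exact le_refl _
        · exact hsufle' y h
    -- B side
    have hB : sort_hal_alt (a :: t) value_dict = b :: (pre ++ suf) := by
      show ((((a :: t).dropLast.reverse).foldl
          (pvSelStep (pvScoreB (pvCovers (PySem.Dict.ofList value_dict).items (a :: t))))
          ((a :: t).getLast hne,
            pvScoreB (pvCovers (PySem.Dict.ofList value_dict).items (a :: t)) ((a :: t).getLast hne),
            ([] : List (List String)), [(a :: t).getLast hne])).1
        :: ((((a :: t).dropLast.reverse).foldl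
          (pvSelStep (pvScoreB (pvCovers (PySem.Dict.ofList value_dict).items (a :: t))))
          ((a :: t).getLast hne,
            pvScoreB (pvCovers (PySem.Dict.ofList value_dict).items (a :: t)) ((a :: t).getLast hne),
            ([] : List (List String)), [(a :: t).getLast hne])).2.2.1)) = b :: (pre ++ suf)
      rw [fold_selB, hbdef]
      simp only
      rw [ho]
    -- A side
    have hmax : PySem.List.max? ((a :: t).map (pvScore (PySem.Dict.ofList value_dict))) (fun x => x)
        = some (pvScore (PySem.Dict.ofList value_dict) b) := by
      cases hm : PySem.List.max? ((a :: t).map (pvScore (PySem.Dict.ofList value_dict))) (fun x => x) with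
      | none => rw [PySem.List.max?_eq_none_iff] at hm; simp at hm
      | some m =>
        obtain ⟨y, hy, hym⟩ := List.mem_map.mp (PySem.List.max?_mem hm)
        have h1 : m ≤ pvScore (PySem.Dict.ofList value_dict) b := hym ▸ hmaxle y hy
        have h2 : pvScore (PySem.Dict.ofList value_dict) b ≤ m :=
          PySem.List.max?_isMax hm _ (List.mem_map_of_mem hbl)
        rw [le_antisymm h1 h2]
    have hidx : PySem.List.index? ((a :: t).map (pvScore (PySem.Dict.ofList value_dict)))
        (pvScore (PySem.Dict.ofList value_dict) b) = some pre.length := by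
      rw [PySem.List.index?_eq_some_iff]
      refine ⟨pre.map (pvScore (PySem.Dict.ofList value_dict)),
        suf.map (pvScore (PySem.Dict.ofList value_dict)), ?_, by simp, ?_⟩
      · rw [hl]; simp
      · intro hmem
        obtain ⟨y, hy, hym⟩ := List.mem_map.mp hmem
        exact absurd hym (ne_of_lt (hprelt y hy))
    have hlen : pre.length < (a :: t).length := by
      have hleneq := congrArg List.length hl
      simp only [List.length_cons, List.length_append] at hleneq ⊢
      omega
    have hpop := PySem.List.pop?_natCast (a :: t) pre.length hlen
    have hget : (a :: t)[pre.length]'hlen = b := by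
      rw [List.getElem_of_eq hl]
      exact getElem_at_split pre suf b
    have herase : (a :: t).eraseIdx pre.length = pre ++ suf := by
      rw [hl]
      exact eraseIdx_at_split pre suf b
    rw [hget, herase] at hpop
    have hscores := scores_eq (a :: t) value_dict
    rw [hB]
    simp only [sort_hal]
    rw [hscores]
    rw [if_pos (by simp : ((a :: t).map (pvScore (PySem.Dict.ofList value_dict))).length > 0)]
    rw [hmax]
    simp only [hidx, hpop, List.singleton_append]
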